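-- pv_equiv track=rewrite | github.com/zerone0x/cs61a | hw/hw02/hw02.py | missing_digits
-- ===== SOURCE A (Python) =====
-- def missing_digits(n):
--     """Given a number a that is in sorted, increasing order,
--     return the number of missing digits in n. A missing digit is
--     a number between the first and last digit of a that is not in n.
--     >>> missing_digits(1248) # 3, 5, 6, 7
--     4
--     >>> missing_digits(1122) # No missing numbers
--     0
--     >>> missing_digits(123456) # No missing numbers
--     0
--     >>> missing_digits(3558) # 4, 6, 7
--     3
--     >>> missing_digits(35578) # 4, 6
--     2
--     >>> missing_digits(12456) # 3
--     1
--     >>> missing_digits(16789) # 2, 3, 4, 5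
--     4
--     >>> missing_digits(19) # 2, 3, 4, 5, 6, 7, 8
--     7
--     >>> missing_digits(4) # No missing numbers between 4 and 4
--     0
--     >>> from construct_check import check
--     >>> # ban while or for loops
--     >>> check(HW_SOURCE_FILE, 'missing_digits', ['While', 'For'])
--     True
--     """
--     "*** YOUR CODE HERE ***"
--
--     if(n < 10):
--         return 0
--     elif(n // 10 % 10 != n % 10 - 1 and n // 10 % 10 != n % 10):
--         return  n % 10 - 1 - (n // 10 % 10) + missing_digits(n // 10)
--     else:
--         return missing_digits(n // 10)
-- ===== SOURCE B (Python) =====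
-- def missing_digits(n):
--     # Telescoping: the summed per-pair gaps collapse to
--     # last - first - (#pairs) + (#adjacent equal pairs).
--     if n < 10:
--         return 0
--     last = n % 10
--     eq = 0
--     length = 1
--     m = n
--     while m >= 10:
--         d = m % 10
--         m //= 10
--         if m % 10 == d:
--             eq += 1
--         length += 1
--     return last - m % 10 - (length - 1) + eq
-- ===== Notes on version B (the rewrite author's own statement) =====
-- stated objective: alternative
-- what changed: Replaces the per-pair gap recursion by a single loop that only counts adjacent equal digit pairs and the digit count, then applies the telescoping identity last - first - (len-1) + equal_pairs.
import Mathlib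
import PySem

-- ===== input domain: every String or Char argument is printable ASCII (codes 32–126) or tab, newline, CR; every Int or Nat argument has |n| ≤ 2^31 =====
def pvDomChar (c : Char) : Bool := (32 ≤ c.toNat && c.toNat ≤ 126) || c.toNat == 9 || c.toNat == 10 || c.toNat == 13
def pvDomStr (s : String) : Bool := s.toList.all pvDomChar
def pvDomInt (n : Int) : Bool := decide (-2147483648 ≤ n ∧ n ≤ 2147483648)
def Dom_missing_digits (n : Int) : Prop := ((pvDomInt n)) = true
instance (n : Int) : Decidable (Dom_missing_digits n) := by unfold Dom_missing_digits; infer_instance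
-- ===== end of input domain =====

-- B replaces A's per-pair gap recursion by one loop counting adjacent equal digit
-- pairs plus the telescoping closed form last - first - (len-1) + eq (alternative).

-- ===== PORT A =====
def missing_digits (n : Int) : Int :=
  if n < 10 then 0
  else if PySem.Int.mod (PySem.Int.floordiv n 10) 10 ≠ PySem.Int.mod n 10 - 1 ∧
          PySem.Int.mod (PySem.Int.floordiv n 10) 10 ≠ PySem.Int.mod n 10 then
    PySem.Int.mod n 10 - 1 - PySem.Int.mod (PySem.Int.floordiv n 10) 10
      + missing_digits (PySem.Int.floordiv n 10)
  else missing_digits (PySem.Int.floordiv n 10)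
termination_by n.toNat
decreasing_by
  all_goals
    rw [PySem.Int.floordiv_eq_ediv_of_pos (by norm_num : (0:Int) < 10)]
    omega

-- ===== PORT B =====
-- the while loop of Source B: state (m, eq, length)
def mdLoop (m eq length : Int) : Int × Int × Int :=
  if 10 ≤ m then
    mdLoop (PySem.Int.floordiv m 10)
      (eq + if PySem.Int.mod (PySem.Int.floordiv m 10) 10 = PySem.Int.mod m 10 then 1 else 0)
      (length + 1)
  else (m, eq, length)
termination_by m.toNat
decreasing_by
  rw [PySem.Int.floordiv_eq_ediv_of_pos (by norm_num : (0:Int) < 10)]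
  omega

def missing_digits_alt (n : Int) : Int :=
  if n < 10 then 0
  else
    let r := mdLoop n 0 1
    PySem.Int.mod n 10 - PySem.Int.mod r.1 10 - (r.2.2 - 1) + r.2.1

-- ===== PRECONDITION & SPEC =====
def Spec_missing_digits (n : Int) (out : Int) : Prop := out = missing_digits_alt n
instance (n : Int) (out : Int) : Decidable (Spec_missing_digits n out) := by unfold Spec_missing_digits; infer_instance

-- ===== CLAIM (what is proved, stated in full; the proofs are below) =====
def Claim_equal_missing_digits : Prop := ∀ (n : Int), Dom_missing_digits n → Spec_missing_digits n (missing_digits n)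

-- ===== LEMMAS AND PROOFS =====

-- loop invariant: A's recursive sum equals the telescoped expression built from mdLoop's final state
theorem mdLoop_key (k : Nat) : ∀ (m eq length : Int), m.toNat ≤ k → 10 ≤ m →
    missing_digits m =
      PySem.Int.mod m 10 - PySem.Int.mod (mdLoop m eq length).1 10
        - ((mdLoop m eq length).2.2 - length) + ((mdLoop m eq length).2.1 - eq) := by
  induction k with
  | zero => intro m eq length hk hm; omega
  | succ k ih =>
    intro m eq length hk hm
    rw [mdLoop, if_pos hm, missing_digits, if_neg (by omega)]
    have hk' : (PySem.Int.floordiv m 10).toNat ≤ k := by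
      rw [PySem.Int.floordiv_eq_ediv_of_pos (by norm_num : (0:Int) < 10)]; omega
    by_cases h10 : 10 ≤ PySem.Int.floordiv m 10
    · have E0 := ih (PySem.Int.floordiv m 10) (eq + 0) (length + 1) hk' h10
      have E1 := ih (PySem.Int.floordiv m 10) (eq + 1) (length + 1) hk' h10
      split_ifs <;> omega
    · have hz : missing_digits (PySem.Int.floordiv m 10) = 0 := by
        rw [missing_digits, if_pos (by omega)]
      rw [mdLoop, if_neg h10, hz]
      have hfd := PySem.Int.floordiv_eq_ediv_of_pos (a := m) (show (0:Int) < 10 by norm_num)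
      have hm1 := PySem.Int.mod_eq_emod_of_pos (a := m) (show (0:Int) < 10 by norm_num)
      have hm2 := PySem.Int.mod_eq_emod_of_pos (a := PySem.Int.floordiv m 10) (show (0:Int) < 10 by norm_num)
      split_ifs <;> dsimp only <;> omega
-- ===== VERDICT (by name: the statement is the Claim_ definition above) =====
theorem missing_digits_spec : Claim_equal_missing_digits := by
  intro n _
  unfold Spec_missing_digits missing_digits_alt
  by_cases h : n < 10
  · rw [missing_digits, if_pos h, if_pos h]
  · rw [if_neg h]
    have := mdLoop_key n.toNat n 0 1 le_rfl (by omega)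
    simpa using this
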